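-- pv_equiv track=rewrite | github.com/TraceofLight/BOJ_solved | 백준/Silver/15663. N과 M （9）/N과 M （9）.py | custom_combination
-- ===== SOURCE A (Python) =====
-- from heapq import heappush, heappop
--
-- def custom_combination(number_list: list, max_select: int) -> list:
--     '''
--     특정 수 집합에서 임의의 갯수만큼 뽑아서 중첩 없이 순서대로 반환하는 함수
--     '''
--
--     if not max_select:
--         return [[]]
--
--     else:
--         result = []
--
--         if max_select:
--             for i in range(len(number_list)):
--                 now_element = number_list[i]
--
--                 for each_combination in custom_combination(number_list[:i] + number_list[i + 1:], max_select - 1):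
--                     now_combination = [now_element] + each_combination
--                     heappush(result, now_combination)
--
--         return result
-- ===== SOURCE B (Python) =====
-- from heapq import heappush
-- from functools import lru_cache
--
--
-- def custom_combination(number_list: list, max_select: int) -> list:
--     '''
--     특정 수 집합에서 임의의 갯수만큼 뽑아서 중첩 없이 순서대로 반환하는 함수
--     '''
--     @lru_cache(maxsize=None)
--     def arrangements(rest: tuple, k: int) -> tuple:
--         if not k:
--             return ((),)
--         heap = []
--         for i in range(len(rest)):
--             for tail in arrangements(rest[:i] + rest[i + 1:], k - 1):
--                 heappush(heap, (rest[i],) + tail)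
--         return tuple(heap)
--
--     return [list(t) for t in arrangements(tuple(number_list), max_select)]
-- ===== Notes on version B (the rewrite author's own statement) =====
-- stated objective: alternative
-- what changed: Replaces A's naive recursion (which recomputes the result for the same remaining sub-list once per removal order) by a memoized helper keyed on (remaining sub-list, depth), so each distinct subproblem is computed exactly once; the trade is a cache dict in exchange for repeated recursive recomputation.
import Mathlib
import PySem

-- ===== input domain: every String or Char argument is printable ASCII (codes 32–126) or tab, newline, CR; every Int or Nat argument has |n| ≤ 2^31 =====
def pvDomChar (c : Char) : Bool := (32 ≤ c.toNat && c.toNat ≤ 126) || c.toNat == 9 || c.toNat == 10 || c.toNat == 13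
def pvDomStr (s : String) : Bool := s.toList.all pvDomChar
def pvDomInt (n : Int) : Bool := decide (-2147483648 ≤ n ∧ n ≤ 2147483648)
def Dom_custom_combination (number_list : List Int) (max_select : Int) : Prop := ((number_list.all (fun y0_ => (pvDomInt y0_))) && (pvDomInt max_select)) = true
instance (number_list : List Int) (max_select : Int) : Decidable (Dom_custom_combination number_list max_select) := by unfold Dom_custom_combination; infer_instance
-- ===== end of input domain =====

-- B memoizes the recursion on (remaining sub-list, depth), computing each distinct subproblem
-- once instead of once per removal order (objective: alternative).

-- Shared helper: Python's heapq.heappush on sequences of ints (both A and B call heapq.heappush;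
-- Python compares lists and tuples of ints by the same lexicographic rule, strict prefix smaller). Exact.
def pyListLt : List Int → List Int → Bool
  | _, [] => false
  | [], _ :: _ => true
  | a :: as, b :: bs => if a < b then true else if b < a then false else pyListLt as bs

-- heapq._siftdown(heap, 0, pos): bubble `item` (sitting at index pos) up while smaller than its parent. Exact.
def siftdown (heap : Array (List Int)) (pos : Nat) (item : List Int) : Array (List Int) :=
  if pos > 0 then
    let parentpos := (pos - 1) / 2
    let parent := heap[parentpos]!
    if pyListLt item parent then siftdown (heap.set! pos parent) parentpos item
    else heap.set! pos item
  else heap.set! pos item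
termination_by pos
decreasing_by omega

-- heapq.heappush(heap, item), returning the resulting heap array. Exact.
def heappush (heap : List (List Int)) (item : List Int) : List (List Int) :=
  (siftdown (heap.toArray.push item) heap.length item).toList

-- ===== PORT A =====
-- number_list[i] is always indexed in range here; ported as getD _ 0 (exact on in-range indices).
-- number_list[:i] + number_list[i+1:] is take i ++ drop (i+1). `.attach` only carries the bound
-- i < length needed for termination.
def custom_combination (number_list : List Int) (max_select : Int) : List (List Int) :=
  if max_select = 0 then [[]]
  else
    (List.range number_list.length).attach.foldl
      (fun result i =>
        (custom_combination (number_list.take i.1 ++ number_list.drop (i.1 + 1)) (max_select - 1)).foldl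
          (fun res e => heappush res (number_list.getD i.1 0 :: e)) result)
      []
termination_by number_list.length
decreasing_by
  have := List.mem_range.mp i.2
  simp only [List.length_append, List.length_take, List.length_drop]
  omega

-- ===== PORT B =====
-- B's inner `arrangements` with its lru_cache: the cache is a Dict keyed by (rest, k) threaded
-- through explicitly; a hit returns the stored value, a miss computes the body and stores it.
-- Python's tuple↔list conversions are identity under the type convention (both are List Int).
def arrangements (rest : List Int) (k : Int)
    (memo : PySem.Dict (List Int × Int) (List (List Int))) :
    List (List Int) × PySem.Dict (List Int × Int) (List (List Int)) :=
  match memo.get? (rest, k) with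
  | some v => (v, memo)
  | none =>
    if k = 0 then ([[]], memo.insert (rest, k) [[]])
    else
      let st := (List.range rest.length).attach.foldl
        (fun st i =>
          let p := arrangements (rest.take i.1 ++ rest.drop (i.1 + 1)) (k - 1) st.2
          (p.1.foldl (fun h tail => heappush h (rest.getD i.1 0 :: tail)) st.1, p.2))
        ([], memo)
      (st.1, st.2.insert (rest, k) st.1)
termination_by rest.length
decreasing_by
  have := List.mem_range.mp i.2
  simp only [List.length_append, List.length_take, List.length_drop]
  omega

def custom_combination_alt (number_list : List Int) (max_select : Int) : List (List Int) :=
  (arrangements number_list max_select PySem.Dict.empty).1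

-- ===== PRECONDITION & SPEC =====
def Spec_custom_combination (number_list : List Int) (max_select : Int) (out : List (List Int)) : Prop := out = custom_combination_alt number_list max_select
instance (number_list : List Int) (max_select : Int) (out : List (List Int)) : Decidable (Spec_custom_combination number_list max_select out) := by unfold Spec_custom_combination; infer_instance

-- ===== CLAIM (what is proved, stated in full; the proofs are below) =====
def Claim_equal_custom_combination : Prop := ∀ (number_list : List Int) (max_select : Int), Dom_custom_combination number_list max_select → Spec_custom_combination number_list max_select (custom_combination number_list max_select)

-- ===== LEMMAS AND PROOFS =====

-- a memo is correct when every stored value is A's value at its key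
def MemoOk (memo : PySem.Dict (List Int × Int) (List (List Int))) : Prop :=
  ∀ r j v, memo.get? (r, j) = some v → v = custom_combination r j

theorem memoOk_insert {memo : PySem.Dict (List Int × Int) (List (List Int))}
    (h : MemoOk memo) (r : List Int) (j : Int) :
    MemoOk (memo.insert (r, j) (custom_combination r j)) := by
  intro r' j' v hv
  rw [PySem.Dict.get?_insert] at hv
  split at hv
  · rename_i heq
    obtain ⟨rfl, rfl⟩ := Prod.mk.injEq .. ▸ heq
    cases hv; rfl
  · exact h r' j' v hv

-- main invariant: starting from a correct memo, `arrangements` returns A's value and a correct memo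
theorem arrangements_ok : ∀ (n : Nat) (rest : List Int) (k : Int)
    (memo : PySem.Dict (List Int × Int) (List (List Int))), rest.length = n → MemoOk memo →
    (arrangements rest k memo).1 = custom_combination rest k ∧
      MemoOk (arrangements rest k memo).2 := by
  intro n
  induction n with
  | zero =>
    intro rest k memo hlen hok
    have hnil : rest = [] := List.length_eq_zero_iff.mp hlen
    subst hnil
    rw [arrangements]
    cases hget : (memo.get? (([] : List Int), k)) with
    | some v => exact ⟨hok [] k v hget, hok⟩
    | none =>
      by_cases hk : k = 0
      · subst hk
        simp only
        constructor
        · rw [custom_combination]; simp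
        · have := memoOk_insert hok [] (0 : Int)
          rw [custom_combination] at this
          simpa using this
      · rw [if_neg hk]
        simp only [List.length_nil, List.range_zero, List.attach_nil, List.foldl_nil]
        constructor
        · rw [custom_combination, if_neg hk]; simp
        · have h0 : custom_combination [] k = [] := by
            rw [custom_combination, if_neg hk]; simp
          have := memoOk_insert hok [] k
          rw [h0] at this
          exact this
  | succ m ih =>
    intro rest k memo hlen hok
    rw [arrangements]
    cases hget : memo.get? ((rest, k)) with
    | some v => exact ⟨hok rest k v hget, hok⟩
    | none =>
      by_cases hk : k = 0
      · subst hk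
        simp only
        constructor
        · rw [custom_combination]; simp
        · simpa [show custom_combination rest 0 = [[]] from by rw [custom_combination]; simp]
            using memoOk_insert hok rest (0 : Int)
      · rw [if_neg hk]
        -- the fold invariant: B's pair fold tracks A's fold and keeps the memo correct
        have inner : ∀ (l : List {x // x ∈ List.range rest.length})
            (acc : List (List Int)) (memo' : PySem.Dict (List Int × Int) (List (List Int))),
            MemoOk memo' →
            (l.foldl (fun st i =>
                let p := arrangements (rest.take i.1 ++ rest.drop (i.1 + 1)) (k - 1) st.2
                (p.1.foldl (fun h tail => heappush h (rest.getD i.1 0 :: tail)) st.1, p.2))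
              (acc, memo')).1
              = l.foldl (fun result i =>
                  (custom_combination (rest.take i.1 ++ rest.drop (i.1 + 1)) (k - 1)).foldl
                    (fun res e => heappush res (rest.getD i.1 0 :: e)) result) acc ∧
            MemoOk (l.foldl (fun st i =>
                let p := arrangements (rest.take i.1 ++ rest.drop (i.1 + 1)) (k - 1) st.2
                (p.1.foldl (fun h tail => heappush h (rest.getD i.1 0 :: tail)) st.1, p.2))
              (acc, memo')).2 := by
          intro l
          induction l with
          | nil => intro acc memo' hok'; exact ⟨rfl, hok'⟩
          | cons i t iht =>
            intro acc memo' hok'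
            have hi : i.1 < rest.length := List.mem_range.mp i.2
            have hchildlen : (rest.take i.1 ++ rest.drop (i.1 + 1)).length = m := by
              simp only [List.length_append, List.length_take, List.length_drop]
              omega
            obtain ⟨hval, hok''⟩ := ih (rest.take i.1 ++ rest.drop (i.1 + 1)) (k - 1) memo'
              hchildlen hok'
            simp only [List.foldl_cons, hval]
            exact iht _ _ hok''
        obtain ⟨h1, h2⟩ := inner (List.range rest.length).attach [] memo hok
        refine ⟨?_, ?_⟩
        · simp only [h1]
          rw [custom_combination, if_neg hk]
        · simp only
          have hA : custom_combination rest k =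
              (List.range rest.length).attach.foldl
                (fun result i =>
                  (custom_combination (rest.take i.1 ++ rest.drop (i.1 + 1)) (k - 1)).foldl
                    (fun res e => heappush res (rest.getD i.1 0 :: e)) result) [] := by
            rw [custom_combination, if_neg hk]
          have := memoOk_insert h2 rest k
          rw [hA, ← h1] at this
          exact this

-- ===== VERDICT (by name: the statement is the Claim_ definition above) =====
theorem custom_combination_spec : Claim_equal_custom_combination := by
  intro nl k _
  unfold Spec_custom_combination custom_combination_alt
  have hok : MemoOk PySem.Dict.empty := by
    intro r j v hv
    simp [PySem.Dict.get?_empty] at hv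
  exact ((arrangements_ok nl.length nl k PySem.Dict.empty rfl hok).1).symm
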